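-- pv_equiv track=rewrite | github.com/henemm/weather_email_autobot | tests/test_debug_output_validation.py | _count_lines_for_geo_point
-- ===== SOURCE A (Python) =====
-- def _count_lines_for_geo_point(section: str, geo_point: str) -> int:
--     """Count lines for a specific geo point in a section."""
--     lines = section.split('\n')
--     count = 0
--     in_geo_point = False
--
--     for line in lines:
--         if geo_point in line:
--             in_geo_point = True
--             count += 1
--         elif in_geo_point and line.strip() and not line.startswith(' ') and 'G' in line:
--             # Next geo point started
--             break
--         elif in_geo_point:
--             count += 1
--
--     return count
-- ===== SOURCE B (Python) =====
-- def _starts_new_block(line, geo_point):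
--     """A line that opens the next geo-point block."""
--     return (geo_point not in line and line.strip() != ''
--             and not line.startswith(' ') and 'G' in line)
--
--
-- def _count_lines_for_geo_point(section, geo_point):
--     """Count lines for a specific geo point in a section."""
--     lines = section.split('\n')
--     # Phase 1: drop lines until the first one mentioning the geo point.
--     while lines and geo_point not in lines[0]:
--         lines = lines[1:]
--     if not lines:
--         return 0
--     # Phase 2: that line plus every following line up to the next block.
--     count = 1
--     for line in lines[1:]:
--         if _starts_new_block(line, geo_point):
--             break
--         count += 1
--     return count
-- ===== Notes on version B (the rewrite author's own statement) =====
-- stated objective: simpler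
-- what changed: Replaces the stateful in_geo_point flag machine with a two-phase pipeline: drop lines until the first one containing geo_point, then count that line plus following lines until a line starting the next block.
import Mathlib
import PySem

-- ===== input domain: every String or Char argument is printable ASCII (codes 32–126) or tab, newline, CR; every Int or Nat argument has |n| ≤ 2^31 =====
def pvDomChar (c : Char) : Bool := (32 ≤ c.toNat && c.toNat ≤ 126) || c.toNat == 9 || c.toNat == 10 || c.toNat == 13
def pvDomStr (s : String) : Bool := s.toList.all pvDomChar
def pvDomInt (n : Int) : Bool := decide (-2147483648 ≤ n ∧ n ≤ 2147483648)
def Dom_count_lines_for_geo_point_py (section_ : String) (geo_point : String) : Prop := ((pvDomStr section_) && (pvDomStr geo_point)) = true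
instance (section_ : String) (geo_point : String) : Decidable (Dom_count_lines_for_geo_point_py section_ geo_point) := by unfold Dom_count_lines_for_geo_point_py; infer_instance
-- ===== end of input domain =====

-- B replaces A's stateful in_geo_point flag loop with a two-phase drop-then-count pipeline (objective: simpler).

-- ===== PORT A =====
-- A's for-loop with (count, in_geo_point) state and break, as structural recursion over the lines.
def pvLoopA (geo_point : String) : List String → Int → Bool → Int
  | [], count, _ => count
  | line :: rest, count, in_geo_point =>
    if PySem.Str.isIn geo_point line then
      pvLoopA geo_point rest (count + 1) true
    else if in_geo_point && PySem.Str.strip line ≠ "" && !PySem.Str.startswith line " " && PySem.Str.isIn "G" line then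
      count
    else if in_geo_point then
      pvLoopA geo_point rest (count + 1) in_geo_point
    else
      pvLoopA geo_point rest count in_geo_point

def count_lines_for_geo_point_py (section_ : String) (geo_point : String) : Int :=
  let lines := (PySem.Str.split? section_ "\n").getD []
  pvLoopA geo_point lines 0 false

-- ===== PORT B =====
-- B's helper: a line that opens the next geo-point block.
def pvStartsNewBlock (geo_point : String) (line : String) : Bool :=
  !PySem.Str.isIn geo_point line && PySem.Str.strip line ≠ ""
    && !PySem.Str.startswith line " " && PySem.Str.isIn "G" line

-- B phase 1: drop lines until the first one mentioning the geo point.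
def pvDropToGeo (geo_point : String) : List String → List String
  | [] => []
  | line :: rest =>
    if PySem.Str.isIn geo_point line then line :: rest else pvDropToGeo geo_point rest

-- B phase 2: count following lines up to the next block.
def pvCountBlock (geo_point : String) : List String → Int
  | [] => 0
  | line :: rest =>
    if pvStartsNewBlock geo_point line then 0 else 1 + pvCountBlock geo_point rest

def count_lines_for_geo_point_py_alt (section_ : String) (geo_point : String) : Int :=
  let lines := (PySem.Str.split? section_ "\n").getD []
  match pvDropToGeo geo_point lines with
  | [] => 0
  | _ :: rest => 1 + pvCountBlock geo_point rest

-- ===== PRECONDITION & SPEC =====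
def Spec_count_lines_for_geo_point_py (section_ : String) (geo_point : String) (out : Int) : Prop := out = count_lines_for_geo_point_py_alt section_ geo_point
instance (section_ : String) (geo_point : String) (out : Int) : Decidable (Spec_count_lines_for_geo_point_py section_ geo_point out) := by unfold Spec_count_lines_for_geo_point_py; infer_instance

-- ===== CLAIM (what is proved, stated in full; the proofs are below) =====
def Claim_equal_count_lines_for_geo_point_py : Prop := ∀ (section_ : String) (geo_point : String), Dom_count_lines_for_geo_point_py section_ geo_point → Spec_count_lines_for_geo_point_py section_ geo_point (count_lines_for_geo_point_py section_ geo_point)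

-- ===== LEMMAS AND PROOFS =====

-- With the flag already set, A's remaining loop counts lines up to the next block.
theorem pvLoopA_true (geo_point : String) (lines : List String) (count : Int) :
    pvLoopA geo_point lines count true = count + pvCountBlock geo_point lines := by
  induction lines generalizing count with
  | nil => simp [pvLoopA, pvCountBlock]
  | cons line rest ih =>
    by_cases hin : PySem.Chars.isIn geo_point.toList line.toList = true
    · simp [pvLoopA, pvCountBlock, pvStartsNewBlock, hin, ih]
      omega
    · have hin' : PySem.Chars.isIn geo_point.toList line.toList = false := by
        simpa using hin
      simp only [pvLoopA, pvCountBlock, pvStartsNewBlock, PySem.Str.isIn_eq, hin',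
        Bool.false_eq_true, if_false, Bool.not_false, Bool.true_and]
      split_ifs with h
      · omega
      · rw [ih]; omega

-- With the flag unset, A's loop skips lines to the first geo-point line, then counts its block.
theorem pvLoopA_false (geo_point : String) (lines : List String) (count : Int) :
    pvLoopA geo_point lines count false =
      count + (match pvDropToGeo geo_point lines with
               | [] => 0
               | _ :: rest => 1 + pvCountBlock geo_point rest) := by
  induction lines generalizing count with
  | nil => simp [pvLoopA, pvDropToGeo]
  | cons line rest ih =>
    by_cases hin : PySem.Chars.isIn geo_point.toList line.toList = true
    · simp [pvLoopA, pvDropToGeo, hin, pvLoopA_true]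
      show count + 1 + pvCountBlock geo_point rest = count + (1 + pvCountBlock geo_point rest)
      omega
    · have hin' : PySem.Chars.isIn geo_point.toList line.toList = false := by
        simpa using hin
      simp [pvLoopA, pvDropToGeo, hin', ih]

-- ===== VERDICT (by name: the statement is the Claim_ definition above) =====
theorem count_lines_for_geo_point_py_spec : Claim_equal_count_lines_for_geo_point_py := by
  intro section_ geo_point _
  unfold Spec_count_lines_for_geo_point_py count_lines_for_geo_point_py count_lines_for_geo_point_py_alt
  simp [pvLoopA_false]
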